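-- pv_equiv track=rewrite | github.com/Egor-05/konfig | hw4/assembler.py | encode_const
-- ===== SOURCE A (Python) =====
-- def encode_const(string):
--     bit_string = '111000'
--     log = {'A': 7, 'B': int(string[1]), 'C': int(string[2])}
--     bit_string += bin(int(string[1]))[2:].rjust(27, '0')[::-1]
--     bit_string += bin(int(string[2]))[2:].rjust(18, '0')[::-1]
--     bit_string = bit_string.ljust(96, '0')
--     array = [int(bit_string[8 * i: 8 * i + 8], 2) for i in range(12)]
--     return array, log
-- ===== SOURCE B (Python) =====
-- def encode_const(string):
--     b = int(string[1])
--     c = int(string[2])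
--     log = {'A': 7, 'B': b, 'C': c}
--     value = 0b111000 << 90
--     for j in range(27):
--         if (b >> j) & 1:
--             value |= 1 << (95 - (6 + j))
--     for j in range(18):
--         if (c >> j) & 1:
--             value |= 1 << (95 - (33 + j))
--     return list(value.to_bytes(12, 'big')), log
-- ===== Notes on version B (the rewrite author's own statement) =====
-- stated objective: idiomatic
-- what changed: Replaces the bit-character-string pipeline (binary text, zero right-justify, slice reversal, zero left-justify, then re-parsing twelve 8-character chunks as base-2 integers) by assembling a single 96-bit integer with shift/or bit placement and splitting it into bytes with to_bytes.
import Mathlib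
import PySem

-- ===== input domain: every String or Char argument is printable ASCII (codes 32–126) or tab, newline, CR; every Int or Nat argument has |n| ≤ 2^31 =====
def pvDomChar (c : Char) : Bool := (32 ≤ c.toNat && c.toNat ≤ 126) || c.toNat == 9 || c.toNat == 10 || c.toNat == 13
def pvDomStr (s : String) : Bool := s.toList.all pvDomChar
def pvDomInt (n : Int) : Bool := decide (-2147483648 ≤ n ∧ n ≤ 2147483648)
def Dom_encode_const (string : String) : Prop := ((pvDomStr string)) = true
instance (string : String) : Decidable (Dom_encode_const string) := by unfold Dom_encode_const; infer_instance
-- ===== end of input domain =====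

-- B replaces A's bit-character-string building (bin/rjust/[::-1]/ljust + base-2 reparsing of
-- 8-char slices) by assembling one 96-bit integer with shifts/ors and splitting it into bytes
-- (idiomatic bit arithmetic; same cost on these fixed-size inputs).


-- ===== PORT A =====
-- bin(n)[2:] : the "0b…" text of n with the first two characters sliced off
def pvBinTail (n : Int) : List Char := (PySem.Int.toBinChars0b n).drop 2
-- s.rjust(w,'0') / s.ljust(w,'0') on char lists (exact: pad only when shorter)
def pvRjust0 (cs : List Char) (w : Nat) : List Char := List.replicate (w - cs.length) '0' ++ cs
def pvLjust0 (cs : List Char) (w : Nat) : List Char := cs ++ List.replicate (w - cs.length) '0'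

-- the body of A after the two int(...) parses succeed with values b and c
def pvBodyA (b c : Int) : List Int × (List (String × Int)) :=
  let log := [("A", (7:Int)), ("B", b), ("C", c)]
  let bit_string := "111000".toList
    ++ (pvRjust0 (pvBinTail b) 27).reverse
    ++ (pvRjust0 (pvBinTail c) 18).reverse
  let bit_string := pvLjust0 bit_string 96
  -- int(chunk, 2): the chunk is 8 chars of '0'/'1', so ofCharsBase? never returns none
  let array := (PySem.List.pyRange 0 12 1).map (fun i =>
    (PySem.Int.ofCharsBase? (PySem.List.slice bit_string (some (8*i)) (some (8*i+8))) 2).getD 0)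
  (array, log)

def encode_const (string : String) : List Int × (List (String × Int)) :=
  -- string[1]/string[2] raise IndexError and int(·) raises ValueError outside Pre_; the
  -- fallback ([], []) below is never reached on Pre_.
  match PySem.Str.pyGet? string 1 with
  | none => ([], [])
  | some c1 =>
    match PySem.Int.ofChars? [c1] with
    | none => ([], [])
    | some b =>
      match PySem.Str.pyGet? string 2 with
      | none => ([], [])
      | some c2 =>
        match PySem.Int.ofChars? [c2] with
        | none => ([], [])
        | some c => pvBodyA b c

-- ===== PORT B =====
-- the body of B after the two int(...) parses succeed with values b and c
def pvBodyB (b c : Int) : List Int × (List (String × Int)) :=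
  let log := [("A", (7:Int)), ("B", b), ("C", c)]
  let value : Nat := 0b111000 <<< 90
  -- 95-(6+j) and 95-(33+j) are nonnegative for the ranged j, so .toNat is exact
  let value := (PySem.List.pyRange 0 27 1).foldl (fun v j =>
    if PySem.Int.band (b >>> j.toNat) 1 ≠ 0 then v ||| ((1:Nat) <<< (95 - (6 + j)).toNat) else v) value
  let value := (PySem.List.pyRange 0 18 1).foldl (fun v j =>
    if PySem.Int.band (c >>> j.toNat) 1 ≠ 0 then v ||| ((1:Nat) <<< (95 - (33 + j)).toNat) else v) value
  -- value.to_bytes(12, 'big'): byte i is (value >> 8*(11-i)) mod 256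
  let array := (PySem.List.pyRange 0 12 1).map (fun i =>
    (((value >>> (8 * (11 - i)).toNat) % 256 : Nat) : Int))
  (array, log)

def encode_const_alt (string : String) : List Int × (List (String × Int)) :=
  match PySem.Str.pyGet? string 1 with
  | none => ([], [])
  | some c1 =>
    match PySem.Int.ofChars? [c1] with
    | none => ([], [])
    | some b =>
      match PySem.Str.pyGet? string 2 with
      | none => ([], [])
      | some c2 =>
        match PySem.Int.ofChars? [c2] with
        | none => ([], [])
        | some c => pvBodyB b c

-- ===== PRECONDITION & SPEC =====
-- Pre_ excludes exactly the inputs where A raises: strings shorter than 3 (IndexError on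
-- string[1] or string[2]) and strings whose characters at positions 1 or 2 are not decimal
-- digits (ValueError from int(·) on a single non-digit character).
def Pre_encode_const (string : String) : Prop :=
  3 ≤ string.toList.length
    ∧ PySem.Chars.isdigit (string.toList.getD 1 ' ') = true
    ∧ PySem.Chars.isdigit (string.toList.getD 2 ' ') = true
instance (string : String) : Decidable (Pre_encode_const string) := by unfold Pre_encode_const; infer_instance
def pvWitness_encode_const : String := "d57"

def Spec_encode_const (string : String) (out : List Int × (List (String × Int))) : Prop := out = encode_const_alt string
instance (string : String) (out : List Int × (List (String × Int))) : Decidable (Spec_encode_const string out) := by unfold Spec_encode_const; infer_instance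

-- ===== CLAIM (what is proved, stated in full; the proofs are below) =====
def Claim_equal_encode_const : Prop := ∀ (string : String), Dom_encode_const string → Pre_encode_const string → Spec_encode_const string (encode_const string)

-- ===== LEMMAS AND PROOFS =====
theorem pvPyGet_cons1 {c0 c1 : Char} {rest : List Char} (s : String) (h : s.toList = c0 :: c1 :: rest) :
    PySem.Str.pyGet? s 1 = some c1 := by
  simp only [PySem.Str.pyGet?_eq, PySem.Chars.pyGet?_eq_listPyGet?, h,
    PySem.List.pyGet?, PySem.List.pyIdx?]
  rw [if_pos (by simp), if_pos (by simp)]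
  rfl

theorem pvPyGet_cons2 {c0 c1 c2 : Char} {rest : List Char} (s : String) (h : s.toList = c0 :: c1 :: c2 :: rest) :
    PySem.Str.pyGet? s 2 = some c2 := by
  simp only [PySem.Str.pyGet?_eq, PySem.Chars.pyGet?_eq_listPyGet?, h,
    PySem.List.pyGet?, PySem.List.pyIdx?]
  rw [if_pos (by simp), if_pos (by simp; omega)]
  rfl

theorem char_eq_of_toNat {c d : Char} (h : c.toNat = d.toNat) : c = d := by
  apply Char.ext; exact UInt32.toNat_inj.mp h

theorem digit_cases (c : Char) (h : PySem.Chars.isdigit c = true) :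
    c = '0' ∨ c = '1' ∨ c = '2' ∨ c = '3' ∨ c = '4' ∨ c = '5' ∨ c = '6' ∨ c = '7' ∨ c = '8' ∨ c = '9' := by
  simp [PySem.Chars.isdigit, Char.le_def, UInt32.le_iff_toNat_le] at h
  have hb : 48 ≤ c.toNat ∧ c.toNat ≤ 57 := h
  have h10 : c.toNat = 48 ∨ c.toNat = 49 ∨ c.toNat = 50 ∨ c.toNat = 51 ∨ c.toNat = 52 ∨ c.toNat = 53 ∨
      c.toNat = 54 ∨ c.toNat = 55 ∨ c.toNat = 56 ∨ c.toNat = 57 := by omega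
  rcases h10 with h|h|h|h|h|h|h|h|h|h <;>
    [exact Or.inl (char_eq_of_toNat h);
     exact Or.inr (Or.inl (char_eq_of_toNat h));
     exact Or.inr (Or.inr (Or.inl (char_eq_of_toNat h)));
     exact Or.inr (Or.inr (Or.inr (Or.inl (char_eq_of_toNat h))));
     exact Or.inr (Or.inr (Or.inr (Or.inr (Or.inl (char_eq_of_toNat h)))));
     exact Or.inr (Or.inr (Or.inr (Or.inr (Or.inr (Or.inl (char_eq_of_toNat h))))));
     exact Or.inr (Or.inr (Or.inr (Or.inr (Or.inr (Or.inr (Or.inl (char_eq_of_toNat h)))))));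
     exact Or.inr (Or.inr (Or.inr (Or.inr (Or.inr (Or.inr (Or.inr (Or.inl (char_eq_of_toNat h))))))));
     exact Or.inr (Or.inr (Or.inr (Or.inr (Or.inr (Or.inr (Or.inr (Or.inr (Or.inl (char_eq_of_toNat h)))))))));
     exact Or.inr (Or.inr (Or.inr (Or.inr (Or.inr (Or.inr (Or.inr (Or.inr (Or.inr (char_eq_of_toNat h)))))))))]

-- the two ports agree once the two parsed digit characters are fixed
theorem digit_bounds (c : Char) (h : PySem.Chars.isdigit c = true) :
    48 ≤ c.toNat ∧ c.toNat ≤ 57 := by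
  simp [PySem.Chars.isdigit, Char.le_def, UInt32.le_iff_toNat_le] at h
  exact h

set_option maxRecDepth 8000 in
theorem ofChars_digit (c : Char) (h : PySem.Chars.isdigit c = true) :
    PySem.Int.ofChars? [c] = some ((c.toNat : Int) - 48) := by
  rcases digit_cases c h with rfl|rfl|rfl|rfl|rfl|rfl|rfl|rfl|rfl|rfl <;> decide

-- the bodies agree for all pairs of decimal digit values
set_option maxRecDepth 100000 in
theorem core10 : ∀ b c : Fin 10, pvBodyA b c = pvBodyB b c := by decide

theorem pvCore (d1 d2 : Char) (h1 : PySem.Chars.isdigit d1 = true) (h2 : PySem.Chars.isdigit d2 = true)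
    (s : String) (g1 : PySem.Str.pyGet? s 1 = some d1) (g2 : PySem.Str.pyGet? s 2 = some d2) :
    encode_const s = encode_const_alt s := by
  obtain ⟨lb1, ub1⟩ := digit_bounds d1 h1
  obtain ⟨lb2, ub2⟩ := digit_bounds d2 h2
  unfold encode_const encode_const_alt
  rw [g1, g2]
  dsimp only
  rw [ofChars_digit d1 h1, ofChars_digit d2 h2]
  dsimp only
  have e := core10 ⟨d1.toNat - 48, by omega⟩ ⟨d2.toNat - 48, by omega⟩
  have c1 : ((⟨d1.toNat - 48, by omega⟩ : Fin 10) : Int) = (d1.toNat : Int) - 48 := by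
    simp; omega
  have c2 : ((⟨d2.toNat - 48, by omega⟩ : Fin 10) : Int) = (d2.toNat : Int) - 48 := by
    simp; omega
  rw [c1, c2] at e
  exact e

-- ===== VERDICT (by name: the statement is the Claim_ definition above) =====
theorem encode_const_spec : Claim_equal_encode_const := by
  intro s _ hpre
  obtain ⟨hlen, hd1, hd2⟩ := hpre
  unfold Spec_encode_const
  rcases hl : s.toList with _ | ⟨c0, _ | ⟨c1, _ | ⟨c2, rest⟩⟩⟩ <;> rw [hl] at hlen <;> simp at hlen
  rw [hl] at hd1 hd2
  simp only [List.getD, List.getElem?_cons_succ, List.getElem?_cons_zero, Option.getD_some] at hd1 hd2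
  exact pvCore c1 c2 hd1 hd2 s (pvPyGet_cons1 s hl) (pvPyGet_cons2 s hl)
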